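-- pv_equiv track=rewrite | github.com/charliemessier/AIDev-SecureSoftwareProcess-Project | task5_generate_csv.py | has_security_keyword
-- ===== SOURCE A (Python) =====
-- SECURITY_KEYWORDS = [
--     "race",
--     "racy",
--     "buffer",
--     "overflow",
--     "stack",
--     "integer",
--     "signedness",
--     "underflow",
--     "improper",
--     "unauthenticated",
--     "gain access",
--     "permission",
--     "cross site",
--     "css",
--     "xss",
--     "denial service",
--     "dos",
--     "crash",
--     "deadlock",
--     "injection",
--     "request forgery",
--     "csrf",
--     "xsrf",
--     "forged",
--     "security",
--     "vulnerability",
--     "vulnerable",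
--     "exploit",
--     "attack",
--     "bypass",
--     "backdoor",
--     "threat",
--     "expose",
--     "breach",
--     "violate",
--     "fatal",
--     "blacklist",
--     "overrun",
--     "insecure",
-- ]
--
-- def has_security_keyword(text: str) -> int:
--     if not isinstance(text, str):
--         return 0
--
--     lower_text = text.lower()
--     for kw in SECURITY_KEYWORDS:
--         if kw in lower_text:
--             return 1
--     return 0
-- ===== SOURCE B (Python) =====
-- SECURITY_KEYWORDS = [
--     "race", "racy", "buffer", "overflow", "stack", "integer", "signedness",
--     "underflow", "improper", "unauthenticated", "gain access", "permission",
--     "cross site", "css", "xss", "denial service", "dos", "crash", "deadlock",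
--     "injection", "request forgery", "csrf", "xsrf", "forged", "security",
--     "vulnerability", "vulnerable", "exploit", "attack", "bypass", "backdoor",
--     "threat", "expose", "breach", "violate", "fatal", "blacklist", "overrun",
--     "insecure",
-- ]
--
-- def has_security_keyword(text):
--     if not isinstance(text, str):
--         return 0
--     lt = text.lower()
--     return int(any(lt.startswith(kw, i)
--                    for i in range(len(lt) + 1)
--                    for kw in SECURITY_KEYWORDS))
-- ===== Notes on version B (the rewrite author's own statement) =====
-- stated objective: alternative
-- what changed: B transposes the search: instead of one substring scan per keyword (keyword-major, 'kw in text'), B makes a single position-major pass over the lowered text and at each start position checks whether any keyword begins there via startswith.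
import Mathlib
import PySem

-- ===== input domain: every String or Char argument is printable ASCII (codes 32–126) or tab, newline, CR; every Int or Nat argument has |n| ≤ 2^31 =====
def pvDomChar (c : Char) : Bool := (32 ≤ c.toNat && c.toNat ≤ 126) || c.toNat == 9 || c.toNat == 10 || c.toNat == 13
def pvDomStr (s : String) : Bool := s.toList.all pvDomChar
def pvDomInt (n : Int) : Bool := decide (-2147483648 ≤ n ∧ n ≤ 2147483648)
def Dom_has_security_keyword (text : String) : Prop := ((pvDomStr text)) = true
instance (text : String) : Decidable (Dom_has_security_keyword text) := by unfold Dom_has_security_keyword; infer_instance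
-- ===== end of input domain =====

-- B: single position-major pass checking every keyword as a prefix at each start position,
-- instead of A's one substring scan per keyword (alternative decomposition, same behaviour).


-- ===== PORT A =====
def SECURITY_KEYWORDS : List String :=
  ["race", "racy", "buffer", "overflow", "stack", "integer", "signedness",
   "underflow", "improper", "unauthenticated", "gain access", "permission",
   "cross site", "css", "xss", "denial service", "dos", "crash", "deadlock",
   "injection", "request forgery", "csrf", "xsrf", "forged", "security",
   "vulnerability", "vulnerable", "exploit", "attack", "bypass", "backdoor",
   "threat", "expose", "breach", "violate", "fatal", "blacklist", "overrun",
   "insecure"]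

-- A's loop: return 1 at the first keyword contained in lower_text, else 0.
def aLoop (kws : List String) (lowerText : String) : Int :=
  match kws with
  | [] => 0
  | kw :: rest => if PySem.Str.isIn kw lowerText then 1 else aLoop rest lowerText

def has_security_keyword (text : String) : Int :=
  aLoop SECURITY_KEYWORDS (PySem.Str.lower text)

-- ===== PORT B =====
-- B: does any keyword start at this position (lt.startswith(kw, i) for some kw)?
def bMatchHere (cs : List Char) : Bool :=
  SECURITY_KEYWORDS.any (fun kw => kw.toList.isPrefixOf cs)

-- B: one pass over all start positions of the lowered text (range(len(lt)+1)).
def bScan (cs : List Char) : Bool :=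
  match cs with
  | [] => bMatchHere []
  | _ :: rest => bMatchHere cs || bScan rest

def has_security_keyword_alt (text : String) : Int :=
  if bScan (PySem.Chars.lower text.toList) then 1 else 0

-- ===== PRECONDITION & SPEC =====
def Spec_has_security_keyword (text : String) (out : Int) : Prop := out = has_security_keyword_alt text
instance (text : String) (out : Int) : Decidable (Spec_has_security_keyword text out) := by unfold Spec_has_security_keyword; infer_instance

-- ===== CLAIM (what is proved, stated in full; the proofs are below) =====
def Claim_equal_has_security_keyword : Prop := ∀ (text : String), Dom_has_security_keyword text → Spec_has_security_keyword text (has_security_keyword text)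

-- ===== LEMMAS AND PROOFS =====

-- A's early-return loop is the Boolean 'some keyword is contained'.
theorem aLoop_eq (kws : List String) (lt : String) :
    aLoop kws lt = if kws.any (fun kw => PySem.Str.isIn kw lt) then 1 else 0 := by
  induction kws with
  | nil => simp [aLoop]
  | cons kw rest ih =>
    simp only [aLoop, List.any_cons, ih]
    by_cases h : PySem.Chars.isIn kw.toList lt.toList = true <;> simp [h]

-- B's scan finds a match iff some keyword is a prefix of some suffix.
theorem bScan_iff (cs : List Char) :
    bScan cs = true ↔ ∃ j, bMatchHere (cs.drop j) = true := by
  induction cs with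
  | nil =>
    constructor
    · intro h; exact ⟨0, h⟩
    · rintro ⟨j, h⟩; simpa using h
  | cons c rest ih =>
    simp only [bScan, Bool.or_eq_true, ih]
    constructor
    · rintro (h | ⟨j, h⟩)
      · exact ⟨0, h⟩
      · exact ⟨j + 1, h⟩
    · rintro ⟨j, h⟩
      cases j with
      | zero => exact Or.inl h
      | succ k => exact Or.inr ⟨k, h⟩

theorem bScan_eq_any (cs : List Char) :
    bScan cs = SECURITY_KEYWORDS.any (fun kw => PySem.Chars.isIn kw.toList cs) := by
  rcases h : SECURITY_KEYWORDS.any (fun kw => PySem.Chars.isIn kw.toList cs) with _ | _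
  · rw [Bool.eq_false_iff]
    intro hs
    rcases (bScan_iff cs).mp hs with ⟨j, hj⟩
    rcases List.any_eq_true.mp hj with ⟨kw, hkw, hpre⟩
    have : PySem.Chars.isIn kw.toList cs = true :=
      (PySem.Chars.exists_prefix_drop_iff_isIn _ _).mp ⟨j, List.isPrefixOf_iff_prefix.mp hpre⟩
    have : SECURITY_KEYWORDS.any (fun kw => PySem.Chars.isIn kw.toList cs) = true :=
      List.any_eq_true.mpr ⟨kw, hkw, this⟩
    simp [this] at h
  · rcases List.any_eq_true.mp h with ⟨kw, hkw, hin⟩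
    rcases (PySem.Chars.exists_prefix_drop_iff_isIn _ _).mpr hin with ⟨j, hj⟩
    exact (bScan_iff cs).mpr ⟨j, List.any_eq_true.mpr
      ⟨kw, hkw, List.isPrefixOf_iff_prefix.mpr hj⟩⟩

-- ===== VERDICT (by name: the statement is the Claim_ definition above) =====
theorem has_security_keyword_spec : Claim_equal_has_security_keyword := by
  intro text _
  unfold Spec_has_security_keyword has_security_keyword has_security_keyword_alt
  rw [aLoop_eq, bScan_eq_any]
  have h : (SECURITY_KEYWORDS.any fun kw => PySem.Str.isIn kw (PySem.Str.lower text)) =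
      SECURITY_KEYWORDS.any fun kw => PySem.Chars.isIn kw.toList (PySem.Chars.lower text.toList) := by
    refine List.any_congr rfl (fun kw => ?_)
    rw [PySem.Str.isIn_eq, PySem.Str.toList_lower]
  rw [h]
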